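-- pv_equiv track=rewrite | github.com/waggle-sensor/summer2020 | Zur/SocialDistancing/helpers.py | get_violation_count
-- ===== SOURCE A (Python) =====
-- def get_violation_count(distance_pairs):
--     not_safe = []
--     safe = []
--
--     # if not safe, add points to red list
--     for i in range(len(distance_pairs)):
--         if not distance_pairs[i][2]:
--             if (distance_pairs[i][0] not in not_safe) and (distance_pairs[i][0] not in safe):
--                 not_safe.append(distance_pairs[i][0])
--             if (distance_pairs[i][1] not in not_safe) and (distance_pairs[i][1] not in safe):
--                 not_safe.append(distance_pairs[i][1])
--
--     # if safe, add points to green list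
--     for i in range(len(distance_pairs)):
--         if distance_pairs[i][2]:
--             if (distance_pairs[i][0] not in not_safe) and (distance_pairs[i][0] not in safe):
--                 safe.append(distance_pairs[i][0])
--             if (distance_pairs[i][1] not in not_safe) and (distance_pairs[i][1] not in safe):
--                 safe.append(distance_pairs[i][1])
--
--     return len(not_safe), len(safe)
-- ===== SOURCE B (Python) =====
-- def get_violation_count(distance_pairs):
--     unsafe = set()
--     cand = set()
--     for p, q, flag in distance_pairs:
--         if not flag:
--             unsafe.add(p)
--             unsafe.add(q)
--         else:
--             cand.add(p)
--             cand.add(q)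
--     return len(unsafe), len(cand - unsafe)
-- ===== Notes on version B (the rewrite author's own statement) =====
-- stated objective: faster
-- what changed: Replaces A's two filtered scans with quadratic list-membership dedup by a single pass maintaining two hash sets and a final set difference, which enforces the unsafe-over-safe priority without ordering the passes.
import Mathlib
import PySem

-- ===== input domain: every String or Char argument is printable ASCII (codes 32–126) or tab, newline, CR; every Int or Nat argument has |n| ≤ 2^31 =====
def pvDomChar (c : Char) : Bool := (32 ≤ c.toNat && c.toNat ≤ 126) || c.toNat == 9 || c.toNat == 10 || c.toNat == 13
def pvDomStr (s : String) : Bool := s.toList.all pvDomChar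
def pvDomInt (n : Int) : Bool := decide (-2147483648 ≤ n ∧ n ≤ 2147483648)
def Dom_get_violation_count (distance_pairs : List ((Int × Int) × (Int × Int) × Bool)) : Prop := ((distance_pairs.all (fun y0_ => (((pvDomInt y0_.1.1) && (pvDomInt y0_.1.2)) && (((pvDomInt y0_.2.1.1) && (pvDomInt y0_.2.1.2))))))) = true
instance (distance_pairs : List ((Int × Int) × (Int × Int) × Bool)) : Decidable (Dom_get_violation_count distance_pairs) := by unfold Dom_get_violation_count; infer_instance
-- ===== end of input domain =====

-- B replaces A's two filtered scans with list-membership dedup by one pass over the pairs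
-- maintaining two sets plus a final set difference (objective: faster).


-- ===== PORT A =====
-- A-side helpers: the two loop bodies (state = (not_safe, safe)), kept step for step.
def pvStep1 (st : List (Int × Int) × List (Int × Int)) (t : (Int × Int) × (Int × Int) × Bool) :
    List (Int × Int) × List (Int × Int) :=
  if t.2.2 = false then
    let ns := if !(st.1.contains t.1) && !(st.2.contains t.1) then st.1 ++ [t.1] else st.1
    let ns := if !(ns.contains t.2.1) && !(st.2.contains t.2.1) then ns ++ [t.2.1] else ns
    (ns, st.2)
  else st

def pvStep2 (st : List (Int × Int) × List (Int × Int)) (t : (Int × Int) × (Int × Int) × Bool) :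
    List (Int × Int) × List (Int × Int) :=
  if t.2.2 = true then
    let s := if !(st.1.contains t.1) && !(st.2.contains t.1) then st.2 ++ [t.1] else st.2
    let s := if !(st.1.contains t.2.1) && !(s.contains t.2.1) then s ++ [t.2.1] else s
    (st.1, s)
  else st

-- Python's `for i in range(len(distance_pairs))` with indexing is ported via pyRange/pyGetD
-- (exact: every index is in range, so the default is never used).
def get_violation_count (distance_pairs : List ((Int × Int) × (Int × Int) × Bool)) : Int × Int :=
  let dflt : (Int × Int) × (Int × Int) × Bool := ((0, 0), (0, 0), false)
  -- first loop: if not safe, add points to red list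
  let st1 := (PySem.List.pyRange 0 (PySem.List.len distance_pairs) 1).foldl
      (fun st i => pvStep1 st (PySem.List.pyGetD distance_pairs i dflt)) ([], [])
  -- second loop: if safe, add points to green list
  let st2 := (PySem.List.pyRange 0 (PySem.List.len distance_pairs) 1).foldl
      (fun st i => pvStep2 st (PySem.List.pyGetD distance_pairs i dflt)) st1
  ((st2.1.length : Int), (st2.2.length : Int))

-- ===== PORT B =====
def get_violation_count_alt (distance_pairs : List ((Int × Int) × (Int × Int) × Bool)) : Int × Int :=
  let st : PySem.Set (Int × Int) × PySem.Set (Int × Int) :=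
    distance_pairs.foldl
      (fun st t =>
        if t.2.2 = false then
          (PySem.Set.add (PySem.Set.add st.1 t.1) t.2.1, st.2)
        else
          (st.1, PySem.Set.add (PySem.Set.add st.2 t.1) t.2.1))
      (PySem.Set.empty, PySem.Set.empty)
  (PySem.Set.len st.1, PySem.Set.len (PySem.Set.diff st.2 st.1))

-- ===== PRECONDITION & SPEC =====
def Spec_get_violation_count (distance_pairs : List ((Int × Int) × (Int × Int) × Bool)) (out : Int × Int) : Prop := out = get_violation_count_alt distance_pairs
instance (distance_pairs : List ((Int × Int) × (Int × Int) × Bool)) (out : Int × Int) : Decidable (Spec_get_violation_count distance_pairs out) := by unfold Spec_get_violation_count; infer_instance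

-- ===== CLAIM (what is proved, stated in full; the proofs are below) =====
def Claim_equal_get_violation_count : Prop := ∀ (distance_pairs : List ((Int × Int) × (Int × Int) × Bool)), Dom_get_violation_count distance_pairs → Spec_get_violation_count distance_pairs (get_violation_count distance_pairs)

-- ===== LEMMAS AND PROOFS =====

-- componentwise versions of the two accumulators of B's single pass
def pvFu (u : List (Int × Int)) (t : (Int × Int) × (Int × Int) × Bool) : List (Int × Int) :=
  if t.2.2 = false then PySem.Set.add (PySem.Set.add u t.1) t.2.1 else u
def pvFc (c : List (Int × Int)) (t : (Int × Int) × (Int × Int) × Bool) : List (Int × Int) :=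
  if t.2.2 = false then c else PySem.Set.add (PySem.Set.add c t.1) t.2.1

theorem pvB_split (dp : List ((Int × Int) × (Int × Int) × Bool)) (a b : List (Int × Int)) :
    dp.foldl (fun st t =>
        if t.2.2 = false then
          (PySem.Set.add (PySem.Set.add st.1 t.1) t.2.1, st.2)
        else
          (st.1, PySem.Set.add (PySem.Set.add st.2 t.1) t.2.1)) (a, b)
      = (dp.foldl pvFu a, dp.foldl pvFc b) := by
  induction dp generalizing a b with
  | nil => rfl
  | cons t dp ih =>
    simp only [List.foldl_cons]
    by_cases h : t.2.2 = false <;> simp [h, pvFu, pvFc, ih]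

theorem pvStep1_eq (ns : List (Int × Int)) (t : (Int × Int) × (Int × Int) × Bool) :
    pvStep1 (ns, ([] : List (Int × Int))) t = (pvFu ns t, []) := by
  unfold pvStep1 pvFu
  by_cases h : t.2.2 = false
  · simp [h, PySem.Set.add]
  · simp [h]

theorem pvLoop1 (dp : List ((Int × Int) × (Int × Int) × Bool)) (ns : List (Int × Int)) :
    dp.foldl pvStep1 (ns, ([] : List (Int × Int))) = (dp.foldl pvFu ns, []) := by
  induction dp generalizing ns with
  | nil => rfl
  | cons t dp ih => simp only [List.foldl_cons, pvStep1_eq]; exact ih _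

theorem pvAdd_filter (u c : List (Int × Int)) (p : Int × Int) :
    (if !(u.contains p) && !((c.filter (fun x => !(u.contains x))).contains p)
       then c.filter (fun x => !(u.contains x)) ++ [p]
       else c.filter (fun x => !(u.contains x)))
      = (PySem.Set.add c p).filter (fun x => !(u.contains x)) := by
  by_cases hu : u.contains p = true <;> by_cases hc : c.contains p = true <;>
    simp_all [PySem.Set.add, List.filter_append, List.mem_filter]

theorem pvStep2_eq (u c : List (Int × Int)) (t : (Int × Int) × (Int × Int) × Bool) :
    pvStep2 (u, c.filter (fun x => !(u.contains x))) t
      = (u, (pvFc c t).filter (fun x => !(u.contains x))) := by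
  unfold pvStep2 pvFc
  by_cases h : t.2.2 = false
  · simp [h]
  · have ht : t.2.2 = true := by simpa using h
    simp only [if_pos ht, if_neg h]
    simp only [pvAdd_filter u c t.1, pvAdd_filter u (PySem.Set.add c t.1) t.2.1]

theorem pvLoop2 (dp : List ((Int × Int) × (Int × Int) × Bool)) (u c : List (Int × Int)) :
    dp.foldl pvStep2 (u, c.filter (fun x => !(u.contains x)))
      = (u, (dp.foldl pvFc c).filter (fun x => !(u.contains x))) := by
  induction dp generalizing c with
  | nil => rfl
  | cons t dp ih => simp only [List.foldl_cons, pvStep2_eq]; exact ih _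

theorem get_violation_count_main (dp : List ((Int × Int) × (Int × Int) × Bool)) :
    get_violation_count dp = get_violation_count_alt dp := by
  unfold get_violation_count get_violation_count_alt
  simp only [PySem.List.foldl_pyRange_zero_pyGetD, pvB_split]
  rw [pvLoop1]
  have h2 := pvLoop2 dp (dp.foldl pvFu []) []
  simp only [List.filter_nil] at h2
  rw [h2]
  rfl

-- ===== VERDICT (by name: the statement is the Claim_ definition above) =====
theorem get_violation_count_spec : Claim_equal_get_violation_count := by
  intro dp _
  unfold Spec_get_violation_count
  exact get_violation_count_main dp
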